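-- pv_equiv track=rewrite | github.com/duythong244/Baitap04 | 5.18.py | find_nearest_higher_frequency
-- ===== SOURCE A (Python) =====
-- from collections import Counter
--
-- def find_nearest_higher_frequency(arr):
--     freq = Counter(arr)
--     result = [-1] * len(arr)
--     stack = []
--
--     for i in range(len(arr) - 1, -1, -1):
--         while stack and freq[arr[i]] >= freq[arr[stack[-1]]]:
--             stack.pop()
--         if stack:
--             result[i] = arr[stack[-1]]
--         stack.append(i)
--
--     return result
-- ===== SOURCE B (Python) =====
-- from collections import Counter
--
-- def find_nearest_higher_frequency(arr):
--     freq = Counter(arr)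
--     n = len(arr)
--     result = []
--     for i in range(n):
--         val = -1
--         for j in range(i + 1, n):
--             if freq[arr[j]] > freq[arr[i]]:
--                 val = arr[j]
--                 break
--         result.append(val)
--     return result
-- ===== Notes on version B (the rewrite author's own statement) =====
-- stated objective: simpler
-- what changed: Replaces the right-to-left monotonic-stack pass (pop while freq >= top's freq, then read the surviving top) with a direct per-index forward scan taking the first element to the right whose frequency is strictly higher.
import Mathlib
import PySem

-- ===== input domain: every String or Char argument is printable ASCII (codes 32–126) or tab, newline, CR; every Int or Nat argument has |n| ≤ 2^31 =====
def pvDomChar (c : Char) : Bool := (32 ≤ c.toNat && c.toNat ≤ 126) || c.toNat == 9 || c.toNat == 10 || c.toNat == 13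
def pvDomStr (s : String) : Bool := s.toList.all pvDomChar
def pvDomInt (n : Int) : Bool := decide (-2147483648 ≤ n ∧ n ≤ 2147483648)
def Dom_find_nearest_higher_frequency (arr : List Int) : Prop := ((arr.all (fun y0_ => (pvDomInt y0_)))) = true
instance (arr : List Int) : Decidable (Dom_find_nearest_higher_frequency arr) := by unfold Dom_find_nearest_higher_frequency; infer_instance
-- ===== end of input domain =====

-- B replaces A's right-to-left monotonic-stack pass with a per-index forward scan
-- for the first element to the right of strictly higher frequency (simpler, not faster).

-- ===== PORT A =====
-- the 'while stack and freq[arr[i]] >= freq[arr[stack[-1]]]: stack.pop()' loop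
def popA (freq : PySem.Dict Int Int) (arr : List Int) (i : Int) (stack : List Int) : List Int :=
  if h : stack ≠ [] ∧
      freq.getD (PySem.List.pyGetD arr i 0) 0 ≥
        freq.getD (PySem.List.pyGetD arr (PySem.List.pyGetD stack (-1) 0) 0) 0 then
    popA freq arr i stack.dropLast
  else stack
termination_by stack.length
decreasing_by
  have := List.length_pos_of_ne_nil h.1
  simp [List.length_dropLast]; omega

-- one iteration of the 'for i in range(len(arr)-1, -1, -1)' loop (state = (result, stack))
def stepA (freq : PySem.Dict Int Int) (arr : List Int) (s : List Int × List Int) (i : Int) :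
    List Int × List Int :=
  let stack := popA freq arr i s.2
  let res := if stack ≠ [] then
      PySem.List.pySetD s.1 i (PySem.List.pyGetD arr (PySem.List.pyGetD stack (-1) 0) 0)
    else s.1
  (res, stack ++ [i])

def find_nearest_higher_frequency (arr : List Int) : List Int :=
  let freq := PySem.Dict.counter arr
  ((PySem.List.pyRange (PySem.List.len arr - 1) (-1) (-1)).foldl (stepA freq arr)
      (PySem.List.pyRepeat [(-1 : Int)] (PySem.List.len arr), [])).1

-- ===== PORT B =====
-- inner 'for j in range(i+1, n): if freq[arr[j]] > freq[arr[i]]: val = arr[j]; break'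
def scanB (freq : PySem.Dict Int Int) (arr : List Int) (fi : Int) (js : List Int) : Int :=
  match js with
  | [] => -1
  | j :: rest =>
      if freq.getD (PySem.List.pyGetD arr j 0) 0 > fi then PySem.List.pyGetD arr j 0
      else scanB freq arr fi rest

def find_nearest_higher_frequency_alt (arr : List Int) : List Int :=
  let freq := PySem.Dict.counter arr
  let n := PySem.List.len arr
  (PySem.List.pyRange 0 n 1).foldl (fun res i =>
      res ++ [scanB freq arr (freq.getD (PySem.List.pyGetD arr i 0) 0)
                (PySem.List.pyRange (i + 1) n 1)]) []

-- ===== PRECONDITION & SPEC =====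
def Spec_find_nearest_higher_frequency (arr : List Int) (out : List Int) : Prop := out = find_nearest_higher_frequency_alt arr
instance (arr : List Int) (out : List Int) : Decidable (Spec_find_nearest_higher_frequency arr out) := by unfold Spec_find_nearest_higher_frequency; infer_instance

-- ===== CLAIM (what is proved, stated in full; the proofs are below) =====
def Claim_equal_find_nearest_higher_frequency : Prop := ∀ (arr : List Int), Dom_find_nearest_higher_frequency arr → Spec_find_nearest_higher_frequency arr (find_nearest_higher_frequency arr)

-- ===== LEMMAS AND PROOFS =====

def fv (arr : List Int) (i : Int) : Int :=
  (PySem.Dict.counter arr).getD (PySem.List.pyGetD arr i 0) 0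

def firstHigh (arr : List Int) (t : Int) (k : Int) : Option Int :=
  if h : k < (arr.length : Int) then
    (if t < fv arr k then some k else firstHigh arr t (k + 1))
  else none
termination_by ((arr.length : Int) - k).toNat
decreasing_by omega

theorem firstHigh_some_bounds (arr : List Int) (t : Int) :
    ∀ (k j : Int), firstHigh arr t k = some j → k ≤ j ∧ j < (arr.length : Int) := by
  have H : ∀ (m : Nat) (k j : Int), ((arr.length : Int) - k).toNat ≤ m →
      firstHigh arr t k = some j → k ≤ j ∧ j < (arr.length : Int) := by
    intro m
    induction m with
    | zero =>
      intro k j hk h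
      rw [firstHigh] at h
      rw [dif_neg (by omega)] at h
      exact absurd h (by simp)
    | succ m ih =>
      intro k j hk h
      rw [firstHigh] at h
      by_cases h1 : k < (arr.length : Int)
      · rw [dif_pos h1] at h
        split_ifs at h with h2
        · cases h; omega
        · have := ih (k + 1) j (by omega) h
          omega
      · rw [dif_neg h1] at h
        exact absurd h (by simp)
  intro k j h
  exact H ((arr.length : Int) - k).toNat k j le_rfl h

theorem firstHigh_trans (arr : List Int) (c t : Int) (hct : c ≤ t) :
    ∀ p : Int, firstHigh arr t p =
      (match firstHigh arr c p with
       | none => none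
       | some j => firstHigh arr t j) := by
  have H : ∀ (m : Nat) (p : Int), ((arr.length : Int) - p).toNat ≤ m →
      firstHigh arr t p =
      (match firstHigh arr c p with
       | none => none
       | some j => firstHigh arr t j) := by
    intro m
    induction m with
    | zero =>
      intro p hp
      have hc : firstHigh arr c p = none := by rw [firstHigh]; rw [dif_neg (by omega)]
      have ht : firstHigh arr t p = none := by rw [firstHigh]; rw [dif_neg (by omega)]
      rw [ht, hc]
    | succ m ih =>
      intro p hp
      by_cases h1 : p < (arr.length : Int)
      · by_cases h2 : c < fv arr p
        · have h3 : firstHigh arr c p = some p := by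
            rw [firstHigh]; rw [dif_pos h1, if_pos h2]
          rw [h3]
        · have h3 : firstHigh arr c p = firstHigh arr c (p + 1) := by
            rw [firstHigh]; rw [dif_pos h1, if_neg h2]
          have h4 : firstHigh arr t p = firstHigh arr t (p + 1) := by
            rw [firstHigh]; rw [dif_pos h1, if_neg (by omega)]
          rw [h3, h4]
          exact ih (p + 1) (by omega)
      · have hc : firstHigh arr c p = none := by rw [firstHigh]; rw [dif_neg h1]
        have ht : firstHigh arr t p = none := by rw [firstHigh]; rw [dif_neg h1]
        rw [ht, hc]
  intro p
  exact H ((arr.length : Int) - p).toNat p le_rfl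

def chain (arr : List Int) (k : Int) : List Int :=
  if h : 0 ≤ k ∧ k < (arr.length : Int) then
    k :: (match h' : firstHigh arr (fv arr k) (k + 1) with
          | none => []
          | some j => chain arr j)
  else []
termination_by ((arr.length : Int) - k).toNat
decreasing_by
  have := firstHigh_some_bounds arr (fv arr k) (k+1) j h'
  omega

def optChain (arr : List Int) : Option Int → List Int
  | none => []
  | some j => chain arr j

theorem chain_eq (arr : List Int) (k : Int) (h0 : 0 ≤ k) (hn : k < (arr.length : Int)) :
    chain arr k = k :: optChain arr (firstHigh arr (fv arr k) (k + 1)) := by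
  rw [chain, dif_pos ⟨h0, hn⟩]
  congr 1
  split <;> rename_i h' <;> rw [h'] <;> rfl

theorem chain_nil (arr : List Int) (k : Int) (h : ¬ (0 ≤ k ∧ k < (arr.length : Int))) :
    chain arr k = [] := by
  rw [chain, dif_neg h]

theorem popA_reverse (arr : List Int) (i : Int) (l : List Int) :
    popA (PySem.Dict.counter arr) arr i l.reverse =
      (l.dropWhile (fun j => decide (fv arr j ≤ fv arr i))).reverse := by
  induction l with
  | nil => rw [popA]; simp
  | cons x xs ih =>
    rw [List.reverse_cons, popA]
    by_cases hc : fv arr x ≤ fv arr i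
    · rw [dif_pos ⟨by simp, by
        simpa [PySem.List.pyGetD_neg_one_append_singleton, fv] using hc⟩]
      rw [List.dropLast_concat]
      rw [ih, List.dropWhile_cons]
      simp [hc]
    · rw [dif_neg (by
        simp only [PySem.List.pyGetD_neg_one_append_singleton]
        intro h
        exact hc (by simpa [fv] using h.2))]
      rw [List.dropWhile_cons]
      simp [hc]

theorem dropWhile_chain (arr : List Int) (t : Int) :
    ∀ k : Int, 0 ≤ k →
      (chain arr k).dropWhile (fun j => decide (fv arr j ≤ t)) =
        optChain arr (firstHigh arr t k) := by
  have H : ∀ (m : Nat) (k : Int), ((arr.length : Int) - k).toNat ≤ m → 0 ≤ k →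
      (chain arr k).dropWhile (fun j => decide (fv arr j ≤ t)) =
        optChain arr (firstHigh arr t k) := by
    intro m
    induction m with
    | zero =>
      intro k hk h0
      rw [chain_nil arr k (by omega)]
      have : firstHigh arr t k = none := by rw [firstHigh, dif_neg (by omega)]
      rw [this]; rfl
    | succ m ih =>
      intro k hk h0
      by_cases h1 : k < (arr.length : Int)
      · rw [chain_eq arr k h0 h1, List.dropWhile_cons]
        by_cases h2 : t < fv arr k
        · have hft : firstHigh arr t k = some k := by
            rw [firstHigh, dif_pos h1, if_pos h2]
          rw [hft]
          simp only [decide_eq_true_eq, if_neg (by omega : ¬ (fv arr k ≤ t))]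
          rw [optChain, chain_eq arr k h0 h1]
        · have hft : firstHigh arr t k = firstHigh arr t (k + 1) := by
            rw [firstHigh, dif_pos h1, if_neg h2]
          rw [hft]
          simp only [decide_eq_true_eq, if_pos (by omega : fv arr k ≤ t)]
          rw [firstHigh_trans arr (fv arr k) t (by omega) (k + 1)]
          cases hnx : firstHigh arr (fv arr k) (k + 1) with
          | none => rfl
          | some j =>
            have hb := firstHigh_some_bounds arr (fv arr k) (k + 1) j hnx
            rw [optChain]
            exact ih j (by omega) (by omega)
      · rw [chain_nil arr k (by omega)]
        have : firstHigh arr t k = none := by rw [firstHigh, dif_neg (by omega)]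
        rw [this]; rfl
  intro k h0
  exact H ((arr.length : Int) - k).toNat k le_rfl h0

theorem scanB_eq (arr : List Int) (fi : Int) :
    ∀ k : Int, scanB (PySem.Dict.counter arr) arr fi (PySem.List.pyRange k (arr.length : Int) 1) =
      (match firstHigh arr fi k with
       | none => -1
       | some j => PySem.List.pyGetD arr j 0) := by
  have H : ∀ (m : Nat) (k : Int), ((arr.length : Int) - k).toNat ≤ m →
      scanB (PySem.Dict.counter arr) arr fi (PySem.List.pyRange k (arr.length : Int) 1) =
      (match firstHigh arr fi k with
       | none => -1
       | some j => PySem.List.pyGetD arr j 0) := by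
    intro m
    induction m with
    | zero =>
      intro k hk
      rw [PySem.List.pyRange_one_eq_nil (by omega)]
      have : firstHigh arr fi k = none := by rw [firstHigh, dif_neg (by omega)]
      rw [this]; rfl
    | succ m ih =>
      intro k hk
      by_cases h1 : k < (arr.length : Int)
      · rw [PySem.List.pyRange_one_cons h1]
        rw [scanB]
        by_cases h2 : fi < fv arr k
        · have hft : firstHigh arr fi k = some k := by
            rw [firstHigh, dif_pos h1, if_pos h2]
          rw [hft, if_pos (by simpa [fv] using h2)]
        · have hft : firstHigh arr fi k = firstHigh arr fi (k + 1) := by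
            rw [firstHigh, dif_pos h1, if_neg h2]
          rw [hft, if_neg (by simpa [fv] using h2)]
          exact ih (k + 1) (by omega)
      · rw [PySem.List.pyRange_one_eq_nil (by omega)]
        have : firstHigh arr fi k = none := by rw [firstHigh, dif_neg (by omega)]
        rw [this]; rfl
  intro k
  exact H ((arr.length : Int) - k).toNat k le_rfl

def ansA (arr : List Int) (i : Int) : Int :=
  match firstHigh arr (fv arr i) (i + 1) with
  | none => -1
  | some j => PySem.List.pyGetD arr j 0

def resAns (arr : List Int) (i : Int) : List Int :=
  (PySem.List.pyRange 0 (arr.length : Int) 1).map (fun j => if j < i then -1 else ansA arr j)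

theorem resAns_succ_none (arr : List Int) (i : Int) (h0 : 0 ≤ i)
    (hfh : firstHigh arr (fv arr i) (i + 1) = none) :
    resAns arr (i + 1) = resAns arr i := by
  unfold resAns
  apply List.map_congr_left
  intro a ha
  rw [PySem.List.mem_pyRange_one] at ha
  by_cases hai : a = i
  · subst hai
    simp only [if_neg (by omega : ¬ a < a)]
    rw [if_pos (by omega), ansA, hfh]
  · have : a < i + 1 ↔ a < i := by omega
    simp [this]

theorem resAns_succ_set (arr : List Int) (i : Int) (h0 : 0 ≤ i) (hn : i < (arr.length : Int)) :
    PySem.List.pySetD (resAns arr (i + 1)) i (ansA arr i) = resAns arr i := by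
  rw [PySem.List.pySetD_of_nonneg _ _ h0]
  unfold resAns
  apply List.ext_getElem
  · simp
  · intro m hm1 hm2
    simp only [List.getElem_set, List.getElem_map, PySem.List.getElem_pyRange_one, zero_add]
    have hmn : m < arr.length := by
      simpa [PySem.List.length_pyRange_one] using hm2
    by_cases hmi : i.toNat = m
    · have hm : (m : Int) = i := by omega
      rw [if_pos hmi, hm, if_neg (by omega)]
    · rw [if_neg hmi]
      have h3 : (m : Int) < i + 1 ↔ (m : Int) < i := by omega
      simp [h3]

theorem stepA_inv (arr : List Int) (i : Int) (h0 : 0 ≤ i) (hn : i < (arr.length : Int)) :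
    stepA (PySem.Dict.counter arr) arr (resAns arr (i + 1), (chain arr (i + 1)).reverse) i =
      (resAns arr i, (chain arr i).reverse) := by
  have hpop : popA (PySem.Dict.counter arr) arr i ((chain arr (i + 1)).reverse) =
      (optChain arr (firstHigh arr (fv arr i) (i + 1))).reverse := by
    rw [popA_reverse, dropWhile_chain arr (fv arr i) (i + 1) (by omega)]
  have hchain : chain arr i = i :: optChain arr (firstHigh arr (fv arr i) (i + 1)) :=
    chain_eq arr i h0 hn
  cases hfh : firstHigh arr (fv arr i) (i + 1) with
  | none =>
    simp only [stepA, hpop, hfh, optChain, List.reverse_nil]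
    rw [if_neg (by simp)]
    rw [resAns_succ_none arr i h0 hfh, hchain, hfh]
    rfl
  | some j =>
    have hb := firstHigh_some_bounds arr (fv arr i) (i + 1) j hfh
    have hcj : chain arr j = j :: optChain arr (firstHigh arr (fv arr j) (j + 1)) :=
      chain_eq arr j (by omega) (by omega)
    simp only [stepA, hpop, hfh, optChain]
    rw [hcj, List.reverse_cons]
    rw [if_pos (by simp)]
    rw [PySem.List.pyGetD_neg_one_append_singleton]
    have : PySem.List.pySetD (resAns arr (i + 1)) i (PySem.List.pyGetD arr j 0) =
        resAns arr i := by
      have ha : ansA arr i = PySem.List.pyGetD arr j 0 := by rw [ansA, hfh]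
      rw [← ha]
      exact resAns_succ_set arr i h0 hn
    rw [this, hchain, hfh]
    simp [optChain, hcj]

theorem loop_inv (arr : List Int) :
    ∀ m : Nat, m ≤ arr.length →
      (PySem.List.pyRange ((m : Int) - 1) (-1) (-1)).foldl
          (stepA (PySem.Dict.counter arr) arr)
          (resAns arr (m : Int), (chain arr (m : Int)).reverse) =
        (resAns arr 0, (chain arr 0).reverse) := by
  intro m
  induction m with
  | zero =>
    intro _
    rw [PySem.List.pyRange_neg_one_eq_nil (by omega)]
    simp
  | succ m ih =>
    intro hm
    have h1 : ((m + 1 : Nat) : Int) - 1 = (m : Int) := by push_cast; ring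
    rw [h1, PySem.List.pyRange_neg_one_cons (by omega)]
    rw [List.foldl_cons]
    have h2 : ((m + 1 : Nat) : Int) = (m : Int) + 1 := by push_cast; ring
    rw [h2, stepA_inv arr (m : Int) (by omega) (by omega)]
    simpa using ih (by omega)

theorem resAns_len (arr : List Int) :
    PySem.List.pyRepeat [(-1 : Int)] ((arr.length : Nat) : Int) = resAns arr (arr.length : Int) := by
  rw [PySem.List.pyRepeat_singleton]
  symm
  rw [List.eq_replicate_iff]
  constructor
  · simp [resAns, PySem.List.length_pyRange_one]
  · intro b hb
    unfold resAns at hb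
    obtain ⟨j, hj, rfl⟩ := List.mem_map.mp hb
    rw [PySem.List.mem_pyRange_one] at hj
    rw [if_pos (by omega)]

theorem a_eq_resAns (arr : List Int) :
    find_nearest_higher_frequency arr = resAns arr 0 := by
  simp only [find_nearest_higher_frequency, PySem.List.len_eq]
  have hc : chain arr (arr.length : Int) = [] := chain_nil _ _ (by omega)
  have hl := loop_inv arr arr.length le_rfl
  rw [hc] at hl
  simp only [List.reverse_nil] at hl
  rw [resAns_len arr, hl]

theorem alt_eq_resAns (arr : List Int) :
    find_nearest_higher_frequency_alt arr = resAns arr 0 := by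
  simp only [find_nearest_higher_frequency_alt, PySem.List.len_eq]
  rw [PySem.List.foldl_append_singleton_eq_map, List.nil_append]
  unfold resAns
  apply List.map_congr_left
  intro a ha
  rw [PySem.List.mem_pyRange_one] at ha
  rw [if_neg (by omega), scanB_eq arr _ (a + 1)]
  rfl

-- ===== VERDICT (by name: the statement is the Claim_ definition above) =====
theorem find_nearest_higher_frequency_spec : Claim_equal_find_nearest_higher_frequency := by
  intro arr _
  unfold Spec_find_nearest_higher_frequency
  rw [a_eq_resAns, alt_eq_resAns]
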